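-- pv_equiv track=rewrite | github.com/olsner/templisp | runlisp.py | cppSafe
-- ===== SOURCE A (Python) =====
-- def cppSafe(sym):
--     res = ''
--     for c in sym:
--         if (c >= 'a' and c <= 'z') or (c >= 'A' and c <= 'Z'):
--             res += c
--         else:
--             res += 'x%d'%ord(c)
--     return res
-- ===== SOURCE B (Python) =====
-- def cppSafe(sym):
--     # Run-based scan: copy maximal runs of ASCII letters wholesale,
--     # escape single non-letter characters; join the pieces at the end.
--     out = []
--     i, n = 0, len(sym)
--     while i < n:
--         j = i
--         while j < n and ('a' <= sym[j] <= 'z' or 'A' <= sym[j] <= 'Z'):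
--             j += 1
--         if j > i:
--             out.append(sym[i:j])
--             i = j
--         else:
--             out.append('x%d' % ord(sym[i]))
--             i += 1
--     return ''.join(out)
-- ===== Notes on version B (the rewrite author's own statement) =====
-- stated objective: alternative
-- what changed: Replaces the per-character if/else string accumulation with a run-based two-level scan that copies maximal letter runs as whole slices, collects pieces in a list and joins once at the end.
import Mathlib
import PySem

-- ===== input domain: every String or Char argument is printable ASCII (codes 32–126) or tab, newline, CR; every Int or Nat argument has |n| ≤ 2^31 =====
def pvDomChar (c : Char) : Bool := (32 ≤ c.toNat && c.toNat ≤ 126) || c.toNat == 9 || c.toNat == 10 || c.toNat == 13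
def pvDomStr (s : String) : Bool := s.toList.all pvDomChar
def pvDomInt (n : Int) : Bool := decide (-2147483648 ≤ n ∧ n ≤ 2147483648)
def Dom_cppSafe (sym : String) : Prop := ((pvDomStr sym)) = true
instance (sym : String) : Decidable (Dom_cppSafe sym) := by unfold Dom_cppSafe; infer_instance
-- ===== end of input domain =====

-- B replaces A's per-character if/else string accumulation with a run-based scan that copies
-- maximal letter runs wholesale and joins the collected pieces once (objective: alternative).

-- ===== PORT A =====
-- ASCII-letter test, exactly A's range comparisons
def pvIsLet (c : Char) : Bool := ('a' ≤ c && c ≤ 'z') || ('A' ≤ c && c ≤ 'Z')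

def cppSafe (sym : String) : String :=
  sym.toList.foldl
    (fun res c =>
      if pvIsLet c then res ++ String.ofList [c]
      else res ++ ("x" ++ PySem.Int.toStr (c.toNat : Int))) ""

-- ===== PORT B =====
-- inner while loop of Source B: split off the maximal leading run of ASCII letters
def pvTakeRun : List Char → List Char × List Char
  | [] => ([], [])
  | c :: cs =>
    if pvIsLet c then
      let p := pvTakeRun cs
      (c :: p.1, p.2)
    else ([], c :: cs)

theorem pvTakeRun_len : ∀ cs : List Char, (pvTakeRun cs).2.length ≤ cs.length := by
  intro cs
  induction cs with
  | nil => simp [pvTakeRun]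
  | cons c cs ih =>
    simp only [pvTakeRun]
    split
    · simpa using Nat.le_succ_of_le ih
    · simp

-- outer while loop of Source B: collect pieces (whole letter runs, or single-char escapes)
def pvAltGo (cs : List Char) : List String :=
  match cs with
  | [] => []
  | c :: rest =>
    if pvIsLet c then
      String.ofList (c :: (pvTakeRun rest).1) :: pvAltGo (pvTakeRun rest).2
    else
      ("x" ++ PySem.Int.toStr (c.toNat : Int)) :: pvAltGo rest
termination_by cs.length
decreasing_by
  · exact Nat.lt_succ_of_le (pvTakeRun_len rest)
  · simp

def cppSafe_alt (sym : String) : String := String.join (pvAltGo sym.toList)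

-- ===== PRECONDITION & SPEC =====
def Spec_cppSafe (sym : String) (out : String) : Prop := out = cppSafe_alt sym
instance (sym : String) (out : String) : Decidable (Spec_cppSafe sym out) := by unfold Spec_cppSafe; infer_instance

-- ===== CLAIM (what is proved, stated in full; the proofs are below) =====
def Claim_equal_cppSafe : Prop := ∀ (sym : String), Dom_cppSafe sym → Spec_cppSafe sym (cppSafe sym)

-- ===== LEMMAS AND PROOFS =====
-- the per-character piece both programs produce
def pvPiece (c : Char) : String :=
  if pvIsLet c then String.ofList [c] else "x" ++ PySem.Int.toStr (c.toNat : Int)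

theorem pvJoinFold (l : List String) : ∀ acc : String, l.foldl (· ++ ·) acc = acc ++ String.join l := by
  induction l with
  | nil => intro acc; simp [String.join]
  | cons s l ih =>
    intro acc
    show l.foldl (· ++ ·) (acc ++ s) = acc ++ String.join (s :: l)
    have : String.join (s :: l) = ("" ++ s) ++ String.join l := by
      show l.foldl (· ++ ·) ("" ++ s) = _
      exact ih _
    rw [ih (acc ++ s), this]
    simp [String.append_assoc]

theorem pvJoinCons (s : String) (l : List String) : String.join (s :: l) = s ++ String.join l := by
  show l.foldl (· ++ ·) ("" ++ s) = _
  rw [pvJoinFold]; simp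

theorem pvJoinAppend (l₁ l₂ : List String) :
    String.join (l₁ ++ l₂) = String.join l₁ ++ String.join l₂ := by
  induction l₁ with
  | nil => simp [String.join]
  | cons s l ih => simp [pvJoinCons, ih, String.append_assoc]

theorem pvFoldA (cs : List Char) :
    ∀ acc : String,
      cs.foldl
        (fun res c =>
          if pvIsLet c then res ++ String.ofList [c]
          else res ++ ("x" ++ PySem.Int.toStr (c.toNat : Int))) acc
        = acc ++ String.join (cs.map pvPiece) := by
  induction cs with
  | nil => intro acc; simp [String.join]
  | cons c cs ih =>
    intro acc
    have hstep : (if pvIsLet c then acc ++ String.ofList [c]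
        else acc ++ ("x" ++ PySem.Int.toStr (c.toNat : Int))) = acc ++ pvPiece c := by
      unfold pvPiece; split <;> rfl
    rw [List.foldl_cons, hstep, ih, List.map_cons, pvJoinCons, String.append_assoc]

theorem pvTakeRun_split : ∀ cs : List Char,
    (pvTakeRun cs).1 ++ (pvTakeRun cs).2 = cs ∧ ∀ c ∈ (pvTakeRun cs).1, pvIsLet c = true := by
  intro cs
  induction cs with
  | nil => simp [pvTakeRun]
  | cons c cs ih =>
    simp only [pvTakeRun]
    split
    · next h => exact ⟨by simp [ih.1], by simpa [h] using fun d hd => ih.2 d hd⟩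
    · simp

theorem pvJoinRun : ∀ r : List Char, (∀ c ∈ r, pvIsLet c = true) →
    String.join (r.map pvPiece) = String.ofList r := by
  intro r
  induction r with
  | nil => intro _; simp [String.join]
  | cons c r ih =>
    intro h
    rw [List.map_cons, pvJoinCons, ih (fun d hd => h d (List.mem_cons_of_mem _ hd))]
    rw [show c :: r = [c] ++ r from rfl, String.ofList_append]
    simp [pvPiece, h c List.mem_cons_self]

theorem pvAltGo_join (cs : List Char) :
    String.join (pvAltGo cs) = String.join (cs.map pvPiece) := by
  induction cs using pvAltGo.induct with
  | case1 => simp [pvAltGo]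
  | case2 c rest h ih =>
    rw [pvAltGo]
    simp only [if_pos h]
    rw [pvJoinCons, ih]
    have hs := pvTakeRun_split rest
    conv_rhs => rw [← hs.1]
    rw [List.map_cons, List.map_append, pvJoinCons, pvJoinAppend,
      pvJoinRun _ hs.2]
    rw [show c :: (pvTakeRun rest).1 = [c] ++ (pvTakeRun rest).1 from rfl, String.ofList_append]
    simp [pvPiece, h, String.append_assoc]
  | case3 c rest h ih =>
    rw [pvAltGo]
    simp only [if_neg h]
    rw [pvJoinCons, ih, List.map_cons, pvJoinCons]
    simp [pvPiece, h]

-- ===== VERDICT (by name: the statement is the Claim_ definition above) =====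
theorem cppSafe_spec : Claim_equal_cppSafe := by
  intro sym _
  unfold Spec_cppSafe cppSafe cppSafe_alt
  rw [pvFoldA, pvAltGo_join]
  simp
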